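-- pv_equiv track=rewrite | github.com/gzhou2142/python_code | cs61a/projects/hog/hog_test.py | swap_strategy
-- ===== SOURCE A (Python) =====
-- def is_prime(x):
--     if x == 1 or x == 0:
--         return False
--     else:
--         for n in range(2,x):
--             if x % n == 0:
--                 return False
--         return True
--
-- def next_prime(x):
--     found = False
--     while not found:
--         x = x + 1
--         if is_prime(x):
--             found = True
--             return x
--
-- def is_swap(score0, score1):
--     """Returns whether the last two digits of SCORE0 and SCORE1 are reversed
--     versions of each other, such as 19 and 91.
--     """
--     # BEGIN Question 4
--     if score0 < 10 and score1 < 10: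
--         x1 = 0
--         y1 = score0
--         x2 = 0
--         y2 = score1
--     elif score0 >= 10 and score1 >=10:
--         x1 = [int(n) for n in str(score0)][-2::][0]
--         y1 = [int(n) for n in str(score0)][-2::][1]
--         x2 = [int(n) for n in str(score1)][-2::][0]
--         y2 = [int(n) for n in str(score1)][-2::][1]
--     elif score0 < 10:
--         x1 = 0
--         y1 = score0
--         x2 = [int(n) for n in str(score1)][-2::][0]
--         y2 = [int(n) for n in str(score1)][-2::][1]
--     elif score1 < 10:
--         x1 = [int(n) for n in str(score0)][-2::][0]
--         y1 = [int(n) for n in str(score0)][-2::][1]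
--         x2 = 0
--         y2 = score1
--
--     set1 = set([int(n) for n in str(score0)][-2::])
--     set2 = set([int(n) for n in str(score1)][-2::])
--
--     if x1==y2 and y1==x2:
--         return True
--     else:
--         return False
--
-- def swap_strategy(score, opponent_score, num_rolls=5):
--     """This strategy rolls 0 dice when it results in a beneficial swap and
--     rolls NUM_ROLLS otherwise.
--     """
--     # BEGIN Question 9
--     free_p = 1 + max([int(i) for i in str(opponent_score)][-2::])
--     if is_prime(free_p):
--         free_p = next_prime(free_p)
--
--     if is_swap(score + free_p, opponent_score) and (score+free_p != opponent_score) and score < opponent_score: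
--         return 0
--     else:
--         return num_rolls  # Replace this statement
-- ===== SOURCE B (Python) =====
-- # Digits by modular arithmetic instead of string parsing; the prime-bump of the
-- # free points (1..10) is precomputed into a lookup table, so no prime loops remain.
-- _FREE = [0, 1, 3, 5, 4, 7, 6, 11, 8, 9, 10]
--
-- def swap_strategy(score, opponent_score, num_rolls=5):
--     d = opponent_score % 100
--     free_p = _FREE[1 + max(d // 10, d % 10)]
--     new = score + free_p
--     a, b = new % 100, opponent_score % 100
--     if a // 10 == b % 10 and a % 10 == b // 10 and new != opponent_score and score < opponent_score:
--         return 0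
--     return num_rolls
-- ===== Notes on version B (the rewrite author's own statement) =====
-- stated objective: simpler
-- what changed: B extracts the last two digits with mod-100 arithmetic instead of A's str()/int() list slicing, collapses is_swap's four-branch ladder into one branchless tens/units comparison, and replaces the is_prime/next_prime loops with an 11-entry precomputed lookup table for the bumped free points.
-- outside the precondition, e.g. on swap_strategy(-1, 0, 5): A returns 5, B returns 5
import Mathlib
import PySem

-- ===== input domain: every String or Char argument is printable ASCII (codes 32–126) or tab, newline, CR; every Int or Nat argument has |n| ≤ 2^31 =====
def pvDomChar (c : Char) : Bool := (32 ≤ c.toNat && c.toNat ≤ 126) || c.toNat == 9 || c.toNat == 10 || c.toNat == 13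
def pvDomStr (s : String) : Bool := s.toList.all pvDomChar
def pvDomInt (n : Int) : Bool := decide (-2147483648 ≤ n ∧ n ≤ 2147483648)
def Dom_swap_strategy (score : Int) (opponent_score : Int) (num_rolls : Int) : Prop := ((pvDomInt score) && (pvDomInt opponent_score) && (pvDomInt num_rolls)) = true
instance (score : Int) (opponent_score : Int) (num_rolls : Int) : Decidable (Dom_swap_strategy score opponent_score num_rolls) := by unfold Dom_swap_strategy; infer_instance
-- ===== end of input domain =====

-- B replaces A's string-based digit extraction by mod-100 arithmetic and the prime-bump
-- of the free points by a precomputed 11-entry lookup table (objective: simpler).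

-- ===== PORT A =====

-- for n in range(2, x): if x % n == 0: return False / else return True
def pv_primeLoop (x : Int) : List Int → Bool
  | [] => true
  | n :: rest => if PySem.Int.mod x n = 0 then false else pv_primeLoop x rest

def pv_is_prime (x : Int) : Bool :=
  if x = 1 ∨ x = 0 then false
  else pv_primeLoop x (PySem.List.pyRange 2 x 1)

-- while not found: x += 1; if is_prime(x): return x   — fuel only makes the loop total;
-- it is never exhausted on the inputs A feeds it (x ≤ 10, next prime ≤ 11)
def pv_next_prime_fuel : Nat → Int → Int
  | 0, _ => 0
  | f+1, x =>
    let x' := x + 1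
    if pv_is_prime x' then x' else pv_next_prime_fuel f x'

def pv_next_prime (x : Int) : Int := pv_next_prime_fuel 1000 x

-- [int(n) for n in str(s)]; the .getD 0 fires only where Python's int() raises (a '-' sign,
-- i.e. s < 0), which Pre_ excludes
def pv_digits (s : Int) : List Int :=
  (PySem.Int.toChars s).map (fun c => (PySem.Int.ofChars? [c]).getD 0)

-- [int(n) for n in str(s)][-2::]
def pv_last2 (s : Int) : List Int := PySem.List.slice (pv_digits s) (some (-2)) none

-- l[i]; the .getD 0 fires only where Python raises IndexError (never inside Pre_)
def pv_get (l : List Int) (i : Int) : Int := (PySem.List.pyGet? l i).getD 0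

def pv_is_swap (score0 : Int) (score1 : Int) : Bool :=
  let q :=
    if score0 < 10 ∧ score1 < 10 then
      ((0 : Int), score0, (0 : Int), score1)
    else if score0 ≥ 10 ∧ score1 ≥ 10 then
      (pv_get (pv_last2 score0) 0, pv_get (pv_last2 score0) 1,
       pv_get (pv_last2 score1) 0, pv_get (pv_last2 score1) 1)
    else if score0 < 10 then
      ((0 : Int), score0, pv_get (pv_last2 score1) 0, pv_get (pv_last2 score1) 1)
    else  -- elif score1 < 10 (the only remaining case)
      (pv_get (pv_last2 score0) 0, pv_get (pv_last2 score0) 1, (0 : Int), score1)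
  let _set1 := PySem.Set.ofList (pv_last2 score0)
  let _set2 := PySem.Set.ofList (pv_last2 score1)
  if q.1 = q.2.2.2 ∧ q.2.1 = q.2.2.1 then true else false

def swap_strategy (score : Int) (opponent_score : Int) (num_rolls : Int) : Int :=
  let free_p0 := 1 + (PySem.List.max? (pv_last2 opponent_score) (fun v => v)).getD 0
  let free_p := if pv_is_prime free_p0 then pv_next_prime free_p0 else free_p0
  if pv_is_swap (score + free_p) opponent_score = true
      ∧ ¬(score + free_p = opponent_score) ∧ score < opponent_score
  then 0 else num_rolls

-- ===== PORT B =====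

def pvb_FREE : List Int := [0, 1, 3, 5, 4, 7, 6, 11, 8, 9, 10]

def swap_strategy_alt (score : Int) (opponent_score : Int) (num_rolls : Int) : Int :=
  let d := PySem.Int.mod opponent_score 100
  -- _FREE[1 + max(d // 10, d % 10)]; the index is always in range, .getD 0 never fires
  let free_p := (PySem.List.pyGet? pvb_FREE (1 + max (PySem.Int.floordiv d 10) (PySem.Int.mod d 10))).getD 0
  let nw := score + free_p
  let a := PySem.Int.mod nw 100
  let b := PySem.Int.mod opponent_score 100
  if PySem.Int.floordiv a 10 = PySem.Int.mod b 10 ∧ PySem.Int.mod a 10 = PySem.Int.floordiv b 10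
      ∧ ¬(nw = opponent_score) ∧ score < opponent_score
  then 0 else num_rolls

-- ===== PRECONDITION & SPEC =====
-- Pre_ restricts to non-negative scores, the game's domain: A's string-based digit extraction
-- raises ValueError on the '-' sign of a negative number (always for a negative opponent_score;
-- for a negative score except the few where the added free points make score+free_p
-- non-negative again — B agrees with A on those as well, but negative scores are outside the
-- game's domain and only reach str() by accident).
def Pre_swap_strategy (score : Int) (opponent_score : Int) (num_rolls : Int) : Prop :=
  0 ≤ score ∧ 0 ≤ opponent_score
instance (score : Int) (opponent_score : Int) (num_rolls : Int) : Decidable (Pre_swap_strategy score opponent_score num_rolls) := by unfold Pre_swap_strategy; infer_instance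

def pvWitness_swap_strategy : Int × Int × Int := (12, 28, 5)

def Spec_swap_strategy (score : Int) (opponent_score : Int) (num_rolls : Int) (out : Int) : Prop := out = swap_strategy_alt score opponent_score num_rolls
instance (score : Int) (opponent_score : Int) (num_rolls : Int) (out : Int) : Decidable (Spec_swap_strategy score opponent_score num_rolls out) := by unfold Spec_swap_strategy; infer_instance

-- ===== CLAIM (what is proved, stated in full; the proofs are below) =====
def Claim_equal_swap_strategy : Prop := ∀ (score : Int) (opponent_score : Int) (num_rolls : Int), Dom_swap_strategy score opponent_score num_rolls → Pre_swap_strategy score opponent_score num_rolls → Spec_swap_strategy score opponent_score num_rolls (swap_strategy score opponent_score num_rolls)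

-- ===== LEMMAS AND PROOFS =====

-- Nat.toDigitsCore: the accumulator is appended
theorem pv_tdc_acc (b : Nat) : ∀ (f n : Nat) (ds : List Char), Nat.toDigitsCore b f n ds = Nat.toDigitsCore b f n [] ++ ds
  | 0, n, ds => by simp [Nat.toDigitsCore]
  | f+1, n, ds => by
    simp only [Nat.toDigitsCore]
    split
    · simp
    · rw [pv_tdc_acc b f (n/b) ((n % b).digitChar :: ds), pv_tdc_acc b f (n/b) [(n % b).digitChar]]
      simp

-- Nat.toDigitsCore: any sufficient fuel gives the same result
theorem pv_tdc_fuel (n : Nat) (f g : Nat) (ds : List Char) (hf : n < f) (hg : n < g) :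
    Nat.toDigitsCore 10 f n ds = Nat.toDigitsCore 10 g n ds := by
  induction n using Nat.strong_induction_on generalizing f g ds with
  | _ n ih =>
    match f, g with
    | f+1, g+1 =>
      simp only [Nat.toDigitsCore]
      split
      · rfl
      · exact ih (n/10) (by omega) _ _ _ (by omega) (by omega)

theorem pv_toDigits_lt (n : Nat) (h : n < 10) : Nat.toDigits 10 n = [Nat.digitChar n] := by
  simp only [Nat.toDigits, Nat.toDigitsCore]
  rw [if_pos (by omega)]
  rw [Nat.mod_eq_of_lt h]

theorem pv_toDigits_ge (n : Nat) (h : 10 ≤ n) :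
    Nat.toDigits 10 n = Nat.toDigits 10 (n/10) ++ [Nat.digitChar (n % 10)] := by
  simp only [Nat.toDigits, Nat.toDigitsCore]
  rw [if_neg (by omega)]
  rw [pv_tdc_fuel (n/10) n (n/10+1) _ (by omega) (by omega)]
  exact pv_tdc_acc 10 _ _ _

theorem pv_slice_single (a : Int) : PySem.List.slice [a] (some (-2)) none = [a] := by
  simp [PySem.List.slice, PySem.List.clampIdx]

theorem pv_slice_last2 (xs : List Int) (a b : Int) :
    PySem.List.slice (xs ++ [a, b]) (some (-2)) none = [a, b] := by
  simp only [PySem.List.slice, PySem.List.clampIdx]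
  have hlen : (xs ++ [a, b]).length = xs.length + 2 := by simp
  rw [hlen]
  have h1 : ((xs.length + 2 : Nat) : Int) + (-2) = (xs.length : Int) := by push_cast; ring
  rw [if_pos (by omega), if_neg (by omega), h1, Int.toNat_natCast]
  have hdrop : List.drop xs.length (xs ++ [a, b]) = [a, b] := by simp
  rw [hdrop]
  have h2 : xs.length + 2 - xs.length = 2 := by omega
  rw [h2]
  rfl

theorem pv_digit_val (d : Nat) (h : d < 10) :
    (PySem.Int.ofChars? [Nat.digitChar d]).getD 0 = (d : Int) := by
  interval_cases d <;> decide

theorem pv_slice_pair (a b : Int) : PySem.List.slice [a, b] (some (-2)) none = [a, b] := by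
  have h := pv_slice_last2 [] a b
  simpa using h

theorem pv_ite_true (P : Prop) [Decidable P] : ((if P then true else false) = true) ↔ P := by
  split <;> simp_all

-- [int(n) for n in str(m)][-2::] for a non-negative m, in modular terms
theorem pv_last2_eq (m : Nat) :
    pv_last2 (m : Int) =
      if (m : Int) < 10 then [(m : Int)]
      else [(m : Int) % 100 / 10, (m : Int) % 100 % 10] := by
  have htc : PySem.Int.toChars (m : Int) = Nat.toDigits 10 m := by
    simp [PySem.Int.toChars]
  unfold pv_last2 pv_digits
  rw [htc]
  by_cases h : m < 10
  · rw [if_pos (by exact_mod_cast h), pv_toDigits_lt m h]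
    simp only [List.map]
    rw [pv_slice_single, pv_digit_val m h]
  · rw [not_lt] at h
    rw [if_neg (by exact_mod_cast not_lt.mpr h), pv_toDigits_ge m h]
    by_cases h2 : m / 10 < 10
    · rw [pv_toDigits_lt _ h2]
      simp only [List.map, List.singleton_append]
      rw [pv_slice_pair, pv_digit_val _ (by omega), pv_digit_val _ (by omega)]
      have e1 : ((m / 10 : Nat) : Int) = (m : Int) % 100 / 10 := by push_cast; omega
      have e2 : ((m % 10 : Nat) : Int) = (m : Int) % 100 % 10 := by push_cast; omega
      rw [e1, e2]
    · rw [not_lt] at h2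
      rw [pv_toDigits_ge _ h2]
      simp only [List.map_append, List.map, List.append_assoc, List.cons_append,
        List.nil_append]
      rw [pv_slice_last2, pv_digit_val _ (by omega), pv_digit_val _ (by omega)]
      have e1 : ((m / 10 % 10 : Nat) : Int) = (m : Int) % 100 / 10 := by push_cast; omega
      have e2 : ((m % 10 : Nat) : Int) = (m : Int) % 100 % 10 := by push_cast; omega
      rw [e1, e2]

theorem pv_free_bump (M : Nat) (h : M ≤ 9) :
    (if pv_is_prime (1 + (M : Int)) then pv_next_prime (1 + (M : Int)) else 1 + (M : Int))
      = (PySem.List.pyGet? pvb_FREE (1 + (M : Int))).getD 0 := by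
  interval_cases M <;> decide

theorem pv_free_pos (M : Nat) (h : M ≤ 9) :
    1 ≤ (PySem.List.pyGet? pvb_FREE (1 + (M : Int))).getD 0 := by
  interval_cases M <;> decide

theorem pv_get_two0 (a b : Int) : pv_get [a, b] 0 = a := by
  simp [pv_get, PySem.List.pyGet?, PySem.List.pyIdx?]

theorem pv_get_two1 (a b : Int) : pv_get [a, b] 1 = b := by
  simp [pv_get, PySem.List.pyGet?, PySem.List.pyIdx?]

theorem pv_max_one (a : Int) : PySem.List.max? [a] (fun v => v) = some a := rfl

theorem pv_max_two (a b : Int) :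
    PySem.List.max? [a, b] (fun v => v) = some (if a < b then b else a) := by
  simp only [PySem.List.max?, List.foldl]
  split <;> rfl

-- A's four-branch is_swap, for non-negative arguments, in B's modular terms
theorem pv_is_swap_eq (m k : Nat) :
    (pv_is_swap (m : Int) (k : Int) = true) ↔
      ((m : Int) % 100 / 10 = (k : Int) % 100 % 10
        ∧ (m : Int) % 100 % 10 = (k : Int) % 100 / 10) := by
  unfold pv_is_swap
  by_cases c1 : (m : Int) < 10 ∧ (k : Int) < 10
  · obtain ⟨h1, h2⟩ := c1
    have a1 : (m : Int) % 100 / 10 = 0 := by omega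
    have a2 : (m : Int) % 100 % 10 = (m : Int) := by omega
    have a3 : (k : Int) % 100 / 10 = 0 := by omega
    have a4 : (k : Int) % 100 % 10 = (k : Int) := by omega
    rw [if_pos (show (m : Int) < 10 ∧ (k : Int) < 10 from ⟨h1, h2⟩), pv_ite_true,
      a1, a2, a3, a4]
  · rw [if_neg c1]
    by_cases c2 : (m : Int) ≥ 10 ∧ (k : Int) ≥ 10
    · obtain ⟨h1, h2⟩ := c2
      rw [if_pos (show (m : Int) ≥ 10 ∧ (k : Int) ≥ 10 from ⟨h1, h2⟩),
        pv_last2_eq m, pv_last2_eq k,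
        if_neg (show ¬((m : Int) < 10) from by omega),
        if_neg (show ¬((k : Int) < 10) from by omega),
        pv_get_two0, pv_get_two1, pv_get_two0, pv_get_two1, pv_ite_true]
    · rw [if_neg c2]
      by_cases c3 : (m : Int) < 10
      · have h2 : (10 : Int) ≤ (k : Int) := by
          rcases lt_or_ge ((k : Int)) 10 with hlt | hge
          · exact absurd ⟨c3, hlt⟩ c1
          · exact hge
        have a1 : (m : Int) % 100 / 10 = 0 := by omega
        have a2 : (m : Int) % 100 % 10 = (m : Int) := by omega
        rw [if_pos c3, pv_last2_eq k, if_neg (show ¬((k : Int) < 10) from by omega),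
          pv_get_two0, pv_get_two1, pv_ite_true, a1, a2]
      · have h2 : (k : Int) < 10 := by
          rcases lt_or_ge ((k : Int)) 10 with hlt | hge
          · exact hlt
          · exact absurd ⟨le_of_not_gt (by simpa using c3), hge⟩ c2
        have a3 : (k : Int) % 100 / 10 = 0 := by omega
        have a4 : (k : Int) % 100 % 10 = (k : Int) := by omega
        rw [if_neg c3, pv_last2_eq m, if_neg c3, pv_get_two0, pv_get_two1,
          pv_ite_true, a3, a4]

-- ===== VERDICT (by name: the statement is the Claim_ definition above) =====
theorem swap_strategy_spec : Claim_equal_swap_strategy := by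
  intro score opponent_score num_rolls _ hpre
  obtain ⟨hs, ho⟩ := hpre
  obtain ⟨m, rfl⟩ := Int.eq_ofNat_of_zero_le hs
  obtain ⟨k, rfl⟩ := Int.eq_ofNat_of_zero_le ho
  unfold Spec_swap_strategy swap_strategy swap_strategy_alt
  have hmod : PySem.Int.mod ((k : Int)) 100 = (k : Int) % 100 :=
    PySem.Int.mod_eq_emod_of_pos (by norm_num)
  have hfd : PySem.Int.floordiv ((k : Int) % 100) 10 = (k : Int) % 100 / 10 :=
    PySem.Int.floordiv_eq_ediv_of_pos (by norm_num)
  have hmd : PySem.Int.mod ((k : Int) % 100) 10 = (k : Int) % 100 % 10 :=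
    PySem.Int.mod_eq_emod_of_pos (by norm_num)
  obtain ⟨M, hM9, hMeq⟩ : ∃ M : Nat, M ≤ 9 ∧
      (M : Int) = max ((k : Int) % 100 / 10) ((k : Int) % 100 % 10) := by
    refine ⟨(k % 100 / 10) ⊔ (k % 100 % 10), by omega, ?_⟩
    push_cast
    omega
  have hfree0 : 1 + (PySem.List.max? (pv_last2 ((k : Int))) (fun v => v)).getD 0
      = 1 + (M : Int) := by
    rw [pv_last2_eq k]
    by_cases hk : (k : Int) < 10
    · rw [if_pos hk, pv_max_one]
      simp only [Option.getD_some]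
      omega
    · rw [if_neg hk, pv_max_two]
      simp only [Option.getD_some]
      split <;> omega
  have hidx : 1 + max ((k : Int) % 100 / 10) ((k : Int) % 100 % 10) = 1 + (M : Int) := by
    omega
  simp only [hmod, hfd, hmd, hidx, hfree0, pv_free_bump M hM9]
  have hFpos : 1 ≤ (PySem.List.pyGet? pvb_FREE (1 + (M : Int))).getD 0 := pv_free_pos M hM9
  obtain ⟨m', hm'⟩ := Int.eq_ofNat_of_zero_le
    (show (0 : Int) ≤ (m : Int) + (PySem.List.pyGet? pvb_FREE (1 + (M : Int))).getD 0 from by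
      have : (0 : Int) ≤ (m : Int) := by positivity
      omega)
  simp only [hm']
  have hamod : PySem.Int.mod ((m' : Int)) 100 = (m' : Int) % 100 :=
    PySem.Int.mod_eq_emod_of_pos (by norm_num)
  have hafd : PySem.Int.floordiv ((m' : Int) % 100) 10 = (m' : Int) % 100 / 10 :=
    PySem.Int.floordiv_eq_ediv_of_pos (by norm_num)
  have hamd : PySem.Int.mod ((m' : Int) % 100) 10 = (m' : Int) % 100 % 10 :=
    PySem.Int.mod_eq_emod_of_pos (by norm_num)
  simp only [hamod, hafd, hamd, pv_is_swap_eq m' k, and_assoc]
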